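-- pv_equiv track=rewrite | github.com/atharva2005paithankar-prog/SpendSmart_PriceCompare_ExpenseTracker | flipkart_price.py | strictest_main_match
-- ===== SOURCE A (Python) =====
-- def strictest_main_match(products, query):
--     # Helper: counts extra words beyond query, ignores order.
--     query_words = set(w.lower() for w in query.split() if w)
--     best_products = []
--     min_extra = None
--     for p in products:
--         name_words = set(w.lower() for w in p["name"].split() if w)
--         # Only keep those containing all query words
--         if not query_words.issubset(name_words):
--             continue
--         # Count extra tokens
--         extra = len(name_words - query_words)
--         if min_extra is None or extra < min_extra:
--             best_products = [p]
--             min_extra = extra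
--         elif extra == min_extra:
--             best_products.append(p)
--     # fallback: If for some reason nothing matches all query words, fallback to original list
--     if best_products:
--         return best_products
--     return products
-- ===== SOURCE B (Python) =====
-- def strictest_main_match(products, query):
--     query_words = set(w.lower() for w in query.split() if w)
--     # Rank every fully-matching product by its number of extra name words.
--     ranked = []
--     for p in products:
--         name_words = set(w.lower() for w in p["name"].split() if w)
--         if query_words <= name_words:
--             ranked.append((len(name_words - query_words), p))
--     # Stable sort by extra count keeps original order among ties.
--     ranked.sort(key=lambda t: t[0])
--     if not ranked:
--         return products
--     best = ranked[0][0]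
--     out = []
--     for extra, p in ranked:
--         if extra != best:
--             break
--         out.append(p)
--     return out
-- ===== Notes on version B (the rewrite author's own statement) =====
-- stated objective: alternative
-- what changed: Replaces A's running-argmin loop (mutable best-list plus current-minimum state) by sort-then-scan: stably sort the fully-matching products by extra-word count and take the leading run of equal counts.
import Mathlib
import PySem

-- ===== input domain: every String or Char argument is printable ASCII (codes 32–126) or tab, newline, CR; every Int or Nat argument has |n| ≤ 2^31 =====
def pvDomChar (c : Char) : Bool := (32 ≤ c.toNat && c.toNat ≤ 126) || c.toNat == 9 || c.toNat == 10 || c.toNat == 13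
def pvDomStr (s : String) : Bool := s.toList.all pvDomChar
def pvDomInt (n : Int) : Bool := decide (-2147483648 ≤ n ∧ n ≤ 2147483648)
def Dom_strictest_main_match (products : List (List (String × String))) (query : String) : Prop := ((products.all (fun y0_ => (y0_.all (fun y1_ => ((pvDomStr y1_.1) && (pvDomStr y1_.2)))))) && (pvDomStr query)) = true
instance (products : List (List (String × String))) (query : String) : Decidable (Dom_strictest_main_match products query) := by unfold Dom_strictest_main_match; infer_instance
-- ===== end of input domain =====

-- B replaces A's running-argmin loop by sort-then-scan: stably sort the matching products
-- by extra-word count and take the leading run of equal counts (objective: alternative).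

-- shared helper: set(w.lower() for w in s.split() if w)
def pvWords (s : String) : PySem.Set String :=
  PySem.Set.ofList (((PySem.Str.split₀ s).filter (fun w => w != "")).map PySem.Str.lower)

-- ===== PORT A =====
-- the body of A's for-loop, on state (best_products, min_extra)
def pvAStep (qw : PySem.Set String)
    (st : List (List (String × String)) × Option Nat) (p : List (String × String)) :
    List (List (String × String)) × Option Nat :=
  let nw := pvWords (((PySem.Dict.ofList p).get? "name").getD "")
  if ¬ (PySem.Set.issubset qw nw = true) then st
  else
    let extra := (PySem.Set.diff nw qw).length
    match st.2 with
    | none => ([p], some extra)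
    | some m =>
      if extra < m then ([p], some extra)
      else if extra = m then (st.1 ++ [p], some m)
      else st

def strictest_main_match (products : List (List (String × String))) (query : String) : List (List (String × String)) :=
  let query_words := pvWords query
  let st := products.foldl (pvAStep query_words) ([], none)
  if st.1.isEmpty then products else st.1

-- ===== PORT B =====
-- ranked entry for one product: some (extra, p) if its name words cover the query words
def pvCand (qw : PySem.Set String) (p : List (String × String)) :
    Option (Nat × (List (String × String))) :=
  let nw := pvWords (((PySem.Dict.ofList p).get? "name").getD "")
  if PySem.Set.issubset qw nw then some ((PySem.Set.diff nw qw).length, p) else none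

-- B's output loop with break: collect products while extra == best, stop at the first other count
def pvPrefix (best : Nat) : List (Nat × (List (String × String))) → List (List (String × String))
  | [] => []
  | (extra, p) :: t => if extra ≠ best then [] else p :: pvPrefix best t

def strictest_main_match_alt (products : List (List (String × String))) (query : String) : List (List (String × String)) :=
  let query_words := pvWords query
  let ranked₀ := products.filterMap (pvCand query_words)
  let ranked := PySem.List.sorted ranked₀ (fun t => t.1) false   -- ranked.sort(key=lambda t: t[0]), stable
  match ranked with
  | [] => products
  | r :: rs => pvPrefix r.1 (r :: rs)   -- best = ranked[0][0]; scan with break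

-- ===== PRECONDITION & SPEC =====
-- Pre_ excludes exactly the inputs where some product lacks the key "name": there A raises KeyError.
def Pre_strictest_main_match (products : List (List (String × String))) (_query : String) : Prop :=
  ∀ p ∈ products, ((PySem.Dict.ofList p).get? "name").isSome
instance (products : List (List (String × String))) (query : String) : Decidable (Pre_strictest_main_match products query) := by unfold Pre_strictest_main_match; infer_instance

def pvWitness_strictest_main_match : (List (List (String × String))) × String :=
  ([[("name", "red Shoe")], [("name", "red shoe XL")]], "Red SHOE")

def Spec_strictest_main_match (products : List (List (String × String))) (query : String) (out : List (List (String × String))) : Prop := out = strictest_main_match_alt products query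
instance (products : List (List (String × String))) (query : String) (out : List (List (String × String))) : Decidable (Spec_strictest_main_match products query out) := by unfold Spec_strictest_main_match; infer_instance

-- ===== CLAIM (what is proved, stated in full; the proofs are below) =====
def Claim_equal_strictest_main_match : Prop := ∀ (products : List (List (String × String))) (query : String), Dom_strictest_main_match products query → Pre_strictest_main_match products query → Spec_strictest_main_match products query (strictest_main_match products query)

-- ===== LEMMAS AND PROOFS =====

-- A's step, factored through the candidate view
def pvStep (st : List (List (String × String)) × Option Nat)
    (c : Nat × (List (String × String))) : List (List (String × String)) × Option Nat :=
  match st.2 with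
  | none => ([c.2], some c.1)
  | some m =>
    if c.1 < m then ([c.2], some c.1)
    else if c.1 = m then (st.1 ++ [c.2], some m)
    else st

lemma pvAStep_eq_pvStep (qw : PySem.Set String) (st) (p) :
    pvAStep qw st p = match pvCand qw p with
      | none => st
      | some c => pvStep st c := by
  simp only [pvAStep, pvCand, pvStep]
  split_ifs <;> simp_all

lemma foldl_pvAStep (qw : PySem.Set String) (products : List (List (String × String)))
    (st : List (List (String × String)) × Option Nat) :
    products.foldl (pvAStep qw) st = (products.filterMap (pvCand qw)).foldl pvStep st := by
  induction products generalizing st with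
  | nil => rfl
  | cons p t ih =>
    simp only [List.foldl_cons, List.filterMap_cons, pvAStep_eq_pvStep]
    cases pvCand qw p <;> simp [ih]

-- invariant of A's running-argmin fold, from a state with a current minimum
lemma foldl_pvStep_some (cs : List (Nat × (List (String × String))))
    (best : List (List (String × String))) (m : Nat) :
    cs.foldl pvStep (best, some m) =
      ((if cs.foldl (fun a c => min a c.1) m = m then best else []) ++
        (cs.filter (fun c => c.1 == cs.foldl (fun a c => min a c.1) m)).map (·.2),
       some (cs.foldl (fun a c => min a c.1) m)) := by
  induction cs generalizing best m with
  | nil => simp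
  | cons c t ih =>
    simp only [List.foldl_cons, pvStep]
    rcases Nat.lt_trichotomy c.1 m with h | h | h
    · have hmin : min m c.1 = c.1 := by omega
      rw [if_pos h, ih]
      simp only [hmin]
      set F := t.foldl (fun a c => min a c.1) c.1 with hF
      have hFle : F ≤ c.1 := by
        simpa [List.foldl_map, ← hF] using (PySem.List.foldl_min_le (t.map (·.1)) c.1).1
      have hne : F ≠ m := by omega
      rw [List.filter_cons]
      by_cases hc : c.1 = F
      · simp [hc, hne]
      · have : ¬ ((c.1 == F) = true) := by simp [hc]
        simp only [this, hne, if_false, Bool.false_eq_true]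
        simp only [if_neg (fun h' : F = c.1 => hc h'.symm)]
    · rw [if_neg (by omega), if_pos h, ih]
      have hmin : min m c.1 = m := by omega
      simp only [hmin]
      set F := t.foldl (fun a c => min a c.1) m with hF
      have hFle : F ≤ m := by
        simpa [List.foldl_map, ← hF] using (PySem.List.foldl_min_le (t.map (·.1)) m).1
      rw [List.filter_cons]
      by_cases hM : F = m
      · simp [hM, h]
      · have : ¬ ((c.1 == F) = true) := by simp; omega
        simp [hM, this]
    · rw [if_neg (by omega), if_neg (by omega), ih]
      have hmin : min m c.1 = m := by omega
      simp only [hmin]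
      set F := t.foldl (fun a c => min a c.1) m with hF
      have hFle : F ≤ m := by
        simpa [List.foldl_map, ← hF] using (PySem.List.foldl_min_le (t.map (·.1)) m).1
      rw [List.filter_cons]
      have : ¬ ((c.1 == F) = true) := by simp; omega
      simp [this]

-- the final minimum is attained by some candidate
lemma pv_min_attained (t : List (Nat × (List (String × String)))) (c : Nat × (List (String × String))) :
    c.1 = t.foldl (fun a c => min a c.1) c.1 ∨
      ∃ c' ∈ t, c'.1 = t.foldl (fun a c => min a c.1) c.1 := by
  have h := PySem.List.foldl_min_mem (t.map (·.1)) c.1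
  simp only [List.foldl_map] at h
  rcases h with h | h
  · exact Or.inl h.symm
  · right
    obtain ⟨c', hc', he⟩ := List.mem_map.mp h
    exact ⟨c', hc', he⟩

-- STABILITY: filtering a sorted list to one key value gives the original-order elements of that key
lemma pv_filter_insertBy (x : Nat × (List (String × String))) (ys : List (Nat × (List (String × String)))) (m : Nat)
    (hs : ys.Pairwise (fun a b => a.1 ≤ b.1)) :
    (PySem.List.insertBy (fun a b => decide (a.1 < b.1)) x ys).filter (fun c => c.1 == m) =
      ys.filter (fun c => c.1 == m) ++ (if x.1 == m then [x] else []) := by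
  induction ys with
  | nil =>
    simp only [PySem.List.insertBy, List.filter_cons, List.filter_nil, List.nil_append]
  | cons y t ih =>
    rw [List.pairwise_cons] at hs
    simp only [PySem.List.insertBy]
    by_cases hb : x.1 < y.1
    · simp only [hb, decide_true, if_true, List.filter_cons]
      by_cases hx : x.1 = m
      · have hym : y.1 ≠ m := by omega
        have hft : t.filter (fun c => c.1 == m) = [] := by
          rw [List.filter_eq_nil_iff]
          intro c hc
          have := hs.1 c hc; simp; omega
        simp [hx, hym, hft]
      · have : ¬ ((x.1 == m) = true) := by simp [hx]
        simp [this]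
    · simp only [hb, decide_false, if_false, Bool.false_eq_true, List.filter_cons]
      rw [ih hs.2]
      split_ifs <;> simp

lemma pv_filter_sorted (cs : List (Nat × (List (String × String)))) (m : Nat) :
    (PySem.List.sorted cs (fun t => t.1) false).filter (fun c => c.1 == m) =
      cs.filter (fun c => c.1 == m) := by
  induction cs using List.reverseRecOn with
  | nil => rfl
  | append_singleton t c ih =>
    have hsort : PySem.List.sorted (t ++ [c]) (fun t => t.1) false =
        PySem.List.insertBy (fun a b => decide (a.1 < b.1)) c (PySem.List.sorted t (fun t => t.1) false) := by
      rw [PySem.List.sorted_eq_foldl_insertBy, PySem.List.sorted_eq_foldl_insertBy, List.foldl_append]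
      rfl
    rw [hsort, pv_filter_insertBy c _ m (PySem.List.sorted_pairwise t (fun t => t.1)), ih,
        List.filter_append]
    split_ifs with h <;> simp_all

-- the break-scan over a sorted list with minimal head key is the filter to that key
lemma pvPrefix_eq_filter (l : List (Nat × (List (String × String)))) (m : Nat)
    (hs : l.Pairwise (fun a b => a.1 ≤ b.1)) (hm : ∀ c ∈ l, m ≤ c.1) :
    pvPrefix m l = (l.filter (fun c => c.1 == m)).map (·.2) := by
  induction l with
  | nil => rfl
  | cons c t ih =>
    rw [List.pairwise_cons] at hs
    simp only [pvPrefix, List.filter_cons]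
    by_cases hc : c.1 = m
    · simp [hc, ih hs.2 (fun c' hc' => hm c' (List.mem_cons_of_mem _ hc'))]
    · have h1 : c.1 ≠ m := hc
      have hrest : t.filter (fun c' => c'.1 == m) = [] := by
        rw [List.filter_eq_nil_iff]
        intro c' hc'
        have := hs.1 c' hc'
        have := hm c (List.mem_cons_self)
        simp; omega
      have : ¬ ((c.1 == m) = true) := by simp [hc]
      simp [h1, this, hrest]

-- ===== VERDICT (by name: the statement is the Claim_ definition above) =====
theorem strictest_main_match_spec : Claim_equal_strictest_main_match := by
  intro products query _ _
  unfold Spec_strictest_main_match strictest_main_match strictest_main_match_alt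
  simp only [foldl_pvAStep]
  cases hcs : products.filterMap (pvCand (pvWords query)) with
  | nil => simp [PySem.List.sorted]
  | cons c t =>
    -- A's side: running argmin = filter at the minimum M
    simp only [List.foldl_cons]
    have hstep : pvStep ([], none) c = ([c.2], some c.1) := rfl
    rw [hstep, foldl_pvStep_some]
    set M := t.foldl (fun a c => min a c.1) c.1 with hM
    -- B's side: the sorted list is nonempty; its head key equals M
    cases hr : PySem.List.sorted (c :: t) (fun t => t.1) false with
    | nil => exact absurd ((PySem.List.sorted_eq_nil_iff _ _ _).mp hr) (by simp)
    | cons r rs =>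
      have hrmem : r ∈ c :: t := by
        rw [← PySem.List.mem_sorted (c :: t) (fun t => t.1) false]; rw [hr]; exact List.mem_cons_self
      have hrle : ∀ y ∈ c :: t, r.1 ≤ y.1 := PySem.List.key_head_sorted_le (c :: t) (fun t => t.1) hr
      have hMle : ∀ y ∈ c :: t, M ≤ y.1 := by
        intro y hy
        have hle := (PySem.List.foldl_min_le (t.map (·.1)) c.1)
        simp only [List.foldl_map] at hle
        rcases List.mem_cons.mp hy with rfl | hyt
        · exact hle.1
        · exact hle.2 y.1 (List.mem_map_of_mem hyt)
      have hrM : r.1 = M := by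
        have h1 : M ≤ r.1 := hMle r hrmem
        have h2 : r.1 ≤ M := by
          rcases pv_min_attained t c with h | ⟨c', hc', he⟩
          · exact le_of_le_of_eq (hrle c List.mem_cons_self) h
          · exact le_of_le_of_eq (hrle c' (List.mem_cons_of_mem _ hc')) he
        omega
      -- assemble
      have hpair : (r :: rs).Pairwise (fun a b => a.1 ≤ b.1) := by
        rw [← hr]; exact PySem.List.sorted_pairwise (c :: t) (fun t => t.1)
      have hmlow : ∀ c' ∈ (r :: rs), r.1 ≤ c'.1 := by
        intro c' hc'
        exact hrle c' (by rw [← PySem.List.mem_sorted (c :: t) (fun t => t.1) false]; rw [hr]; exact hc')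
      rw [show (match r :: rs with
            | [] => products
            | r :: rs => pvPrefix r.1 (r :: rs)) = pvPrefix r.1 (r :: rs) from rfl]
      rw [pvPrefix_eq_filter (r :: rs) r.1 hpair hmlow]
      have hfs : (r :: rs).filter (fun c' => c'.1 == r.1) = (c :: t).filter (fun c' => c'.1 == r.1) := by
        rw [← hr]; exact pv_filter_sorted (c :: t) r.1
      rw [hfs, hrM]
      -- A's result shape equals the filter-map, and is nonempty
      have hfilter :
          ((if M = c.1 then [c.2] else []) ++ (t.filter (fun c' => c'.1 == M)).map (·.2)) =
            ((c :: t).filter (fun c' => c'.1 == M)).map (·.2) := by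
        rw [List.filter_cons]
        by_cases h : c.1 = M
        · rw [if_pos h.symm]; simp [h]
        · rw [if_neg (fun h' : M = c.1 => h h'.symm)]; simp [h]
      rw [hfilter]
      have hne : (((c :: t).filter (fun c' => c'.1 == M)).map (·.2)).isEmpty = false := by
        simp only [List.isEmpty_eq_false_iff, ne_eq, List.map_eq_nil_iff, List.filter_eq_nil_iff]
        intro hall
        rcases pv_min_attained t c with h | ⟨c', hc', he⟩
        · exact hall c (List.mem_cons_self) (by simp [← h, hM])
        · exact hall c' (List.mem_cons_of_mem _ hc') (by simp [he, hM])
      simp [hne]
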